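-- pv_equiv track=rewrite | github.com/Fondamenti18/fondamenti-di-programmazione | students/1803854/homework03/program03.py | calcola_bordo
-- ===== SOURCE A (Python) =====
-- def width(image):
-- 	return len(image[0])
--
-- def height(image):
-- 	return len(image)
--
-- def inside(x, y, image):
-- 	return 0 <= x < width(image) and 0 <= y < height(image)
--
-- def calcola_bordo(image, registro):
-- 	registro_bordo = []
-- 	for i in registro:
-- 		x = i[0]
-- 		y = i[1]
-- 		colore = image[y][x]
-- 		if not ((x,y) in registro_bordo):
-- 			if not (inside(x+1, y, image) and inside(x-1, y, image) and inside(x, y+1, image) and inside(x, y-1, image)):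
-- 				registro_bordo += [(x, y)]
-- 			elif not (image[y][x+1] == colore and image[y][x-1] == colore and image[y+1][x] == colore and image[y-1][x] == colore):
-- 				registro_bordo += [(x, y)]
-- 	return set(registro_bordo)
-- ===== SOURCE B (Python) =====
-- def calcola_bordo(image, registro):
--     if not registro:
--         return set()
--     h, w = len(image), len(image[0])
--     # Stage 1: one pass over the image, collecting interior cells whose
--     # 4-neighborhood is not monochrome (zip aligns each cell with its
--     # left/right/up/down neighbors).
--     mismatch = set()
--     for y in range(1, h - 1):
--         up, row, down = image[y - 1], image[y], image[y + 1]
--         for x, (u, l, c, r, d) in enumerate(zip(up[1:], row, row[1:], row[2:], down[1:]), 1):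
--             if x >= w - 1:
--                 break
--             if l != c or r != c or u != c or d != c:
--                 mismatch.add((x, y))
--     # Stage 2: a point is on the border iff it lies on the image frame
--     # (some neighbor falls outside) or is a precomputed mismatch cell.
--     bordo = set()
--     for x, y in registro:
--         if x <= 0 or x >= w - 1 or y <= 0 or y >= h - 1 or (x, y) in mismatch:
--             bordo.add((x, y))
--     return bordo
-- ===== Notes on version B (the rewrite author's own statement) =====
-- stated objective: alternative
-- what changed: B is a two-stage algorithm: it first scans the image itself once (zipping each interior row with its shifted self and its neighbor rows) to precompute the set of interior cells with a non-monochrome 4-neighborhood, then classifies each registered point by pure frame arithmetic (x<=0 or x>=w-1 or y<=0 or y>=h-1) plus one set lookup, instead of A's per-point neighbor probing with a linear list-membership scan.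
-- outside the precondition, e.g. on calcola_bordo([[1, 2, 3], [4, 5, 6], [7]], [(1, 1)]): A returns {(1, 1)}, B returns set(); on calcola_bordo([[1, 2, 3], [4, 5, 6], [7, 8]], [(1, 1)]): A returns {(1, 1)}, B returns {(1, 1)}
import Mathlib
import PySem

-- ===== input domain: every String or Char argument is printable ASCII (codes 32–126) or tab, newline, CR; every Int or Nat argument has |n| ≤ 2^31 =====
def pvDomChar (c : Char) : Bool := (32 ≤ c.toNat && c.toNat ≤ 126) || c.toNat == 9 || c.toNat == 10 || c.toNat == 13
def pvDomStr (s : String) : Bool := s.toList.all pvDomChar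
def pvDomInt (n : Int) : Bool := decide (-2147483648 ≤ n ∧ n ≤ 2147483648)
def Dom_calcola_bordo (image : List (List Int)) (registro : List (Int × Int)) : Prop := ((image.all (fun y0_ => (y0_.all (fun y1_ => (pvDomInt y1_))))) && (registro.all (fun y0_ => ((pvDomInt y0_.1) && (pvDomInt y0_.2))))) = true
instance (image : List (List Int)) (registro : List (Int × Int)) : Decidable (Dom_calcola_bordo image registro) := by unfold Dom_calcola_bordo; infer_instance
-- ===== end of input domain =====

-- B replaces A's per-point neighbor probing (with a linear list-membership scan) by a two-stage
-- algorithm: one zip-based pass over the image precomputing the interior mismatch cells, then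
-- frame arithmetic plus a set lookup per registered point.

-- ===== PORT A =====
-- image[y][x] (Python indexing, negative wrap); default only reached outside Pre_
def pvPixel (image : List (List Int)) (y x : Int) : Int :=
  PySem.List.pyGetD (PySem.List.pyGetD image y []) x 0

-- inside(x, y, image): 0 <= x < width(image) and 0 <= y < height(image); width = len(image[0])
def pvInside (x y : Int) (image : List (List Int)) : Bool :=
  (decide (0 ≤ x) && decide (x < ((PySem.List.pyGetD image 0 []).length : Int))) &&
  (decide (0 ≤ y) && decide (y < (image.length : Int)))

def calcola_bordo (image : List (List Int)) (registro : List (Int × Int)) : List (Int × Int) :=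
  PySem.Set.ofList (registro.foldl (fun acc i =>
    let x := i.1
    let y := i.2
    let colore := pvPixel image y x
    if acc.contains (x, y) then acc
    else if !(pvInside (x+1) y image && pvInside (x-1) y image &&
              pvInside x (y+1) image && pvInside x (y-1) image) then
      acc ++ [(x, y)]
    else if !((pvPixel image y (x+1) == colore) && (pvPixel image y (x-1) == colore) &&
              (pvPixel image (y+1) x == colore) && (pvPixel image (y-1) x == colore)) then
      acc ++ [(x, y)]
    else acc) [])

-- ===== PORT B =====
-- zip(a, b, c, d, e): truncates at the shortest list, like Python's zip
def pvZip5 {alpha : Type} : List alpha → List alpha → List alpha → List alpha → List alpha →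
    List (alpha × alpha × alpha × alpha × alpha)
  | a :: as, b :: bs, c :: cs, d :: ds, e :: es => (a, b, c, d, e) :: pvZip5 as bs cs ds es
  | _, _, _, _, _ => []

-- the inner 'for x, (u, l, c, r, d) in enumerate(zip(...), 1): if x >= w - 1: break; …' loop
def pvRowScan (w y : Int) (s : List (Int × Int)) :
    List (Int × (Int × Int × Int × Int × Int)) → List (Int × Int)
  | [] => s
  | (x, (u, l, c, r, d)) :: rest =>
    if x ≥ w - 1 then s
    else pvRowScan w y
      (if l != c || r != c || u != c || d != c then PySem.Set.add s (x, y) else s) rest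

-- stage 1 of Source B: the set of interior cells whose 4-neighborhood is not monochrome
def pvMismatch (image : List (List Int)) (h w : Int) : List (Int × Int) :=
  (PySem.List.pyRange 1 (h - 1) 1).foldl (fun s y =>
    pvRowScan w y s
      (PySem.List.enumerate
        (pvZip5 (PySem.List.slice (PySem.List.pyGetD image (y - 1) []) (some 1) none)
          (PySem.List.pyGetD image y [])
          (PySem.List.slice (PySem.List.pyGetD image y []) (some 1) none)
          (PySem.List.slice (PySem.List.pyGetD image y []) (some 2) none)
          (PySem.List.slice (PySem.List.pyGetD image (y + 1) []) (some 1) none)) 1))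
    PySem.Set.empty

def calcola_bordo_alt (image : List (List Int)) (registro : List (Int × Int)) : List (Int × Int) :=
  if registro = [] then PySem.Set.empty
  else
    let h := (image.length : Int)
    let w := ((PySem.List.pyGetD image 0 []).length : Int)
    let mismatch := pvMismatch image h w
    registro.foldl (fun bordo p =>
      if decide (p.1 ≤ 0) || decide (p.1 ≥ w - 1) || decide (p.2 ≤ 0) || decide (p.2 ≥ h - 1) ||
         PySem.Set.contains mismatch (p.1, p.2) then
        PySem.Set.add bordo (p.1, p.2)
      else bordo) PySem.Set.empty

-- ===== PRECONDITION & SPEC =====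
-- Pre_ excludes the inputs on which Python A raises IndexError (an empty image with a nonempty
-- registro, or a point whose indices fall outside the wrap-inclusive range of the image / its own
-- row) and, when some registered point is an interior cell, ragged images whose rows are shorter
-- than row 0 — there A's neighbor accesses can raise, and where A happens to return, A's and B's
-- values can differ because B's zip scan truncates at short rows (see cites).
def Pre_calcola_bordo (image : List (List Int)) (registro : List (Int × Int)) : Prop :=
  registro = [] ∨
    (image ≠ [] ∧
     ((∃ p ∈ registro, 1 ≤ p.1 ∧ p.1 ≤ ((PySem.List.pyGetD image 0 []).length : Int) - 2 ∧
         1 ≤ p.2 ∧ p.2 ≤ (image.length : Int) - 2) →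
        ∀ row ∈ image, ((PySem.List.pyGetD image 0 []).length : Int) ≤ (row.length : Int)) ∧
     ∀ p ∈ registro,
       -(((PySem.List.pyGetD image p.2 []).length : Int)) ≤ p.1 ∧
       p.1 < ((PySem.List.pyGetD image p.2 []).length : Int) ∧
       -(image.length : Int) ≤ p.2 ∧ p.2 < (image.length : Int))
instance (image : List (List Int)) (registro : List (Int × Int)) : Decidable (Pre_calcola_bordo image registro) := by unfold Pre_calcola_bordo; infer_instance

def pvWitness_calcola_bordo : List (List Int) × (List (Int × Int)) := ([[1, 2], [3, 4]], [(0, 0), (1, 1)])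

def Spec_calcola_bordo (image : List (List Int)) (registro : List (Int × Int)) (out : List (Int × Int)) : Prop := out = calcola_bordo_alt image registro
instance (image : List (List Int)) (registro : List (Int × Int)) (out : List (Int × Int)) : Decidable (Spec_calcola_bordo image registro out) := by unfold Spec_calcola_bordo; infer_instance

-- ===== CLAIM (what is proved, stated in full; the proofs are below) =====
def Claim_equal_calcola_bordo : Prop := ∀ (image : List (List Int)) (registro : List (Int × Int)), Dom_calcola_bordo image registro → Pre_calcola_bordo image registro → Spec_calcola_bordo image registro (calcola_bordo image registro)

-- ===== LEMMAS AND PROOFS =====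

-- membership in a fold whose step satisfies a membership law
theorem pv_mem_foldl_step {α β : Type} (l : List α) (g : List β → α → List β)
    (C : α → β → Prop) (hg : ∀ s x p, x ∈ l → (p ∈ g s x ↔ p ∈ s ∨ C x p)) (s : List β) (p : β) :
    p ∈ l.foldl g s ↔ p ∈ s ∨ ∃ x ∈ l, C x p := by
  induction l generalizing s with
  | nil => simp
  | cons a l ih =>
    simp only [List.foldl_cons,
      ih (fun s x p hx => hg s x p (List.mem_cons_of_mem _ hx)),
      hg _ _ _ (List.mem_cons_self ..), List.exists_mem_cons_iff]
    tauto

-- the color-difference condition at cell (x, y), in A's pvPixel form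
def pvDiff (image : List (List Int)) (x y : Int) : Prop :=
  ¬((pvPixel image y (x+1) == pvPixel image y x) && (pvPixel image y (x-1) == pvPixel image y x) &&
    (pvPixel image (y+1) x == pvPixel image y x) && (pvPixel image (y-1) x == pvPixel image y x)) = true

-- one step of the zipped suffixes: cons of the cell at index j
theorem pv_zip5_drop_cons (up row down : List Int) (j : Nat)
    (h1 : j + 1 < up.length) (h2 : j + 2 < row.length) (h3 : j + 1 < down.length) :
    pvZip5 (up.drop (j+1)) (row.drop j) (row.drop (j+1)) (row.drop (j+2)) (down.drop (j+1))
    = (up[j+1], row[j], row[j+1], row[j+2], down[j+1]) ::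
      pvZip5 (up.drop (j+2)) (row.drop (j+1)) (row.drop (j+2)) (row.drop (j+3)) (down.drop (j+2)) := by
  rw [List.drop_eq_getElem_cons h1, List.drop_eq_getElem_cons (by omega : j < row.length),
    List.drop_eq_getElem_cons (by omega : j + 1 < row.length), List.drop_eq_getElem_cons h2,
    List.drop_eq_getElem_cons h3]
  rfl

-- invariant of the inner scan: membership in the scan started at index j + 1
theorem pv_rowScan_inv (image : List (List Int)) (w y : Int) (up row down : List Int)
    (hup : w ≤ (up.length : Int)) (hrow : w ≤ (row.length : Int)) (hdown : w ≤ (down.length : Int))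
    (hu : up = PySem.List.pyGetD image (y - 1) []) (hr : row = PySem.List.pyGetD image y [])
    (hd : down = PySem.List.pyGetD image (y + 1) []) (hy : 0 ≤ y) :
    ∀ (n j : Nat) (s : List (Int × Int)) (q : Int × Int), n = (w - 1 - (1 + j)).toNat →
    (q ∈ pvRowScan w y s (PySem.List.enumerate
        (pvZip5 (up.drop (j+1)) (row.drop j) (row.drop (j+1)) (row.drop (j+2)) (down.drop (j+1)))
        (1 + (j : Int)))
     ↔ q ∈ s ∨ ∃ x : Int, 1 + (j : Int) ≤ x ∧ x < w - 1 ∧ pvDiff image x y ∧ q = (x, y)) := by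
  intro n
  induction n with
  | zero =>
    intro j s q hn
    have hwj : w - 1 ≤ 1 + (j : Int) := by omega
    have hempty : ¬ ∃ x : Int, 1 + (j : Int) ≤ x ∧ x < w - 1 ∧ pvDiff image x y ∧ q = (x, y) := by
      rintro ⟨x, h1, h2, _, _⟩; omega
    rcases hZ : pvZip5 (up.drop (j+1)) (row.drop j) (row.drop (j+1)) (row.drop (j+2))
        (down.drop (j+1)) with _ | ⟨⟨u, l, c, r, d⟩, rest⟩
    · simp [hZ, PySem.List.enumerate_nil, pvRowScan, hempty]
    · simp [hZ, PySem.List.enumerate_cons, pvRowScan, show (1 + (j : Int) ≥ w - 1) from hwj, hempty]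
  | succ n ih =>
    intro j s q hn
    have hjw : 1 + (j : Int) < w - 1 := by omega
    have h1 : j + 1 < up.length := by omega
    have h2 : j + 2 < row.length := by omega
    have h3 : j + 1 < down.length := by omega
    rw [pv_zip5_drop_cons up row down j h1 h2 h3, PySem.List.enumerate_cons]
    have hstep : pvRowScan w y s ((1 + (j : Int), up[j+1], row[j], row[j+1], row[j+2], down[j+1]) ::
        PySem.List.enumerate (pvZip5 (up.drop (j+2)) (row.drop (j+1)) (row.drop (j+2))
          (row.drop (j+3)) (down.drop (j+2))) (1 + (j : Int) + 1))
        = pvRowScan w y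
          (if row[j] != row[j+1] || row[j+2] != row[j+1] || up[j+1] != row[j+1] ||
              down[j+1] != row[j+1] then PySem.Set.add s (1 + (j : Int), y) else s)
          (PySem.List.enumerate (pvZip5 (up.drop (j+2)) (row.drop (j+1)) (row.drop (j+2))
            (row.drop (j+3)) (down.drop (j+2))) (1 + (j : Int) + 1)) := by
      simp [pvRowScan, show ¬(1 + (j : Int) ≥ w - 1) from by omega]
    rw [hstep]
    have hcast : 1 + (j : Int) + 1 = 1 + ((j + 1 : Nat) : Int) := by push_cast; ring
    rw [hcast]
    refine (ih (j + 1)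
      (if row[j] != row[j+1] || row[j+2] != row[j+1] || up[j+1] != row[j+1] ||
          down[j+1] != row[j+1] then PySem.Set.add s (1 + (j : Int), y) else s) q (by omega)).trans ?_
    -- identify the scanned cell's values with A's pvPixel reads at x = 1 + j
    have hy1 : (0:Int) ≤ 1 + (j:Int) + 1 := by omega
    have e0 : pvPixel image y (1 + (j : Int)) = row[j+1] := by
      rw [pvPixel, ← hr, PySem.List.pyGetD_eq_getElem _ _ (by omega) (by push_cast; omega)]
      congr 1; omega
    have e1 : pvPixel image y ((1 + (j : Int)) + 1) = row[j+2] := by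
      rw [pvPixel, ← hr, PySem.List.pyGetD_eq_getElem _ _ (by omega) (by push_cast; omega)]
      congr 1; omega
    have e2 : pvPixel image y ((1 + (j : Int)) - 1) = row[j] := by
      rw [pvPixel, ← hr, PySem.List.pyGetD_eq_getElem _ _ (by omega) (by push_cast; omega)]
      congr 1; omega
    have e3 : pvPixel image (y + 1) (1 + (j : Int)) = down[j+1] := by
      rw [pvPixel, ← hd, PySem.List.pyGetD_eq_getElem _ _ (by omega) (by push_cast; omega)]
      congr 1; omega
    have e4 : pvPixel image (y - 1) (1 + (j : Int)) = up[j+1] := by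
      rw [pvPixel, ← hu, PySem.List.pyGetD_eq_getElem _ _ (by omega) (by push_cast; omega)]
      congr 1; omega
    have hdiff : (row[j] != row[j+1] || row[j+2] != row[j+1] || up[j+1] != row[j+1] ||
        down[j+1] != row[j+1]) = true ↔ pvDiff image (1 + (j : Int)) y := by
      rw [pvDiff, e0, e1, e2, e3, e4]
      simp [bne]
      tauto
    by_cases hc : (row[j] != row[j+1] || row[j+2] != row[j+1] || up[j+1] != row[j+1] ||
        down[j+1] != row[j+1]) = true
    · have hdv : pvDiff image (1 + (j : Int)) y := hdiff.mp hc
      simp only [hc, if_true, PySem.Set.mem_add]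
      constructor
      · rintro ((hq | hq) | ⟨x, hx1, hx2, hx3, hx4⟩)
        · exact Or.inl hq
        · exact Or.inr ⟨1 + (j : Int), by omega, by omega, hdv, by simp [hq]⟩
        · exact Or.inr ⟨x, by push_cast at hx1 ⊢; omega, hx2, hx3, hx4⟩
      · rintro (hq | ⟨x, hx1, hx2, hx3, hx4⟩)
        · exact Or.inl (Or.inl hq)
        · by_cases hx : x = 1 + (j : Int)
          · exact Or.inl (Or.inr (by simp [hx4, hx]))
          · exact Or.inr ⟨x, by push_cast; omega, hx2, hx3, hx4⟩
    · have hdv : ¬ pvDiff image (1 + (j : Int)) y := fun h => hc (hdiff.mpr h)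
      simp only [hc, if_false]
      constructor
      · rintro (hq | ⟨x, hx1, hx2, hx3, hx4⟩)
        · exact Or.inl hq
        · exact Or.inr ⟨x, by push_cast at hx1 ⊢; omega, hx2, hx3, hx4⟩
      · rintro (hq | ⟨x, hx1, hx2, hx3, hx4⟩)
        · exact Or.inl hq
        · by_cases hx : x = 1 + (j : Int)
          · exact absurd (hx ▸ hx3) hdv
          · exact Or.inr ⟨x, by push_cast; omega, hx2, hx3, hx4⟩

-- characterization of stage 1 on a rectangular-enough image:
-- (x,y) ∈ mismatch ↔ interior cell with a differing neighbor
theorem pv_mem_mismatch (image : List (List Int))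
    (hrows : ∀ row ∈ image, ((PySem.List.pyGetD image 0 []).length : Int) ≤ (row.length : Int)) (p : Int × Int) :
    (p ∈ pvMismatch image (image.length : Int) ((PySem.List.pyGetD image 0 []).length : Int))
    ↔ (1 ≤ p.1 ∧ p.1 < ((PySem.List.pyGetD image 0 []).length : Int) - 1 ∧
       1 ≤ p.2 ∧ p.2 < (image.length : Int) - 1 ∧ pvDiff image p.1 p.2) := by
  have hrow_mem : ∀ t : Int, 0 ≤ t → t < (image.length : Int) →
      PySem.List.pyGetD image t [] ∈ image := by
    intro t h0 h1
    rw [PySem.List.pyGetD_eq_getElem _ _ h0 h1]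
    exact List.getElem_mem _
  unfold pvMismatch
  rw [pv_mem_foldl_step _ _
      (fun y q => ∃ x : Int, 1 ≤ x ∧ x < ((PySem.List.pyGetD image 0 []).length : Int) - 1 ∧
        pvDiff image x y ∧ q = (x, y))
      (fun s y q hy => by
        rw [PySem.List.mem_pyRange_one] at hy
        rw [PySem.List.slice_from_one, ← List.drop_one,
          show PySem.List.slice (PySem.List.pyGetD image y []) (some 2) none
              = (PySem.List.pyGetD image y []).drop 2 from by
            rw [show (2:Int) = ((2:Nat):Int) from by norm_num, PySem.List.slice_from_natCast],
          PySem.List.slice_from_one, ← List.drop_one,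
          PySem.List.slice_from_one, ← List.drop_one]
        have hup := hrows _ (hrow_mem (y-1) (by omega) (by omega))
        have hrow := hrows _ (hrow_mem y (by omega) (by omega))
        have hdown := hrows _ (hrow_mem (y+1) (by omega) (by omega))
        exact pv_rowScan_inv image ((PySem.List.pyGetD image 0 []).length : Int) y
          (PySem.List.pyGetD image (y-1) []) (PySem.List.pyGetD image y [])
          (PySem.List.pyGetD image (y+1) []) hup hrow hdown rfl rfl rfl (by omega)
          ((((PySem.List.pyGetD image 0 []).length : Int) - 1 - (1 + ((0:Nat):Int))).toNat)
          0 s q rfl)]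
  simp only [PySem.Set.empty, List.not_mem_nil, false_or, PySem.List.mem_pyRange_one]
  constructor
  · rintro ⟨y, hy, x, hx1, hx2, hd, rfl⟩
    exact ⟨hx1, hx2, hy.1, by omega, hd⟩
  · rintro ⟨h1, h2, h3, h4, hd⟩
    exact ⟨p.2, ⟨h3, by omega⟩, p.1, h1, h2, hd, rfl⟩

-- the border predicate B computes equals A's flat two-branch condition
theorem pv_border_eq (image : List (List Int)) (x y : Int)
    (hrows : (1 ≤ x ∧ x ≤ ((PySem.List.pyGetD image 0 []).length : Int) - 2 ∧
        1 ≤ y ∧ y ≤ (image.length : Int) - 2) →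
      ∀ row ∈ image, ((PySem.List.pyGetD image 0 []).length : Int) ≤ (row.length : Int)) :
    (decide (x ≤ 0) || decide (x ≥ ((PySem.List.pyGetD image 0 []).length : Int) - 1) ||
     decide (y ≤ 0) || decide (y ≥ (image.length : Int) - 1) ||
     PySem.Set.contains (pvMismatch image (image.length : Int)
       ((PySem.List.pyGetD image 0 []).length : Int)) (x, y))
    = (!(pvInside (x+1) y image && pvInside (x-1) y image &&
         pvInside x (y+1) image && pvInside x (y-1) image)
       || !((pvPixel image y (x+1) == pvPixel image y x) && (pvPixel image y (x-1) == pvPixel image y x) &&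
            (pvPixel image (y+1) x == pvPixel image y x) && (pvPixel image (y-1) x == pvPixel image y x))) := by
  rw [Bool.eq_iff_iff]
  by_cases hint : (1 ≤ x ∧ x ≤ ((PySem.List.pyGetD image 0 []).length : Int) - 2 ∧
      1 ≤ y ∧ y ≤ (image.length : Int) - 2)
  · have hchar := pv_mem_mismatch image (hrows hint) (x, y)
    simp only [Bool.or_eq_true, Bool.and_eq_true, Bool.not_eq_eq_eq_not,
      Bool.not_true, Bool.and_eq_false_iff, decide_eq_true_iff, decide_eq_false_iff_not,
      PySem.Set.contains_iff, hchar, pvDiff, pvInside, beq_eq_false_iff_ne, ne_eq,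
      beq_iff_eq, not_and, not_le, not_lt]
    by_cases d1 : pvPixel image y (x+1) = pvPixel image y x <;>
    by_cases d2 : pvPixel image y (x-1) = pvPixel image y x <;>
    by_cases d3 : pvPixel image (y+1) x = pvPixel image y x <;>
    by_cases d4 : pvPixel image (y-1) x = pvPixel image y x <;>
    simp [d1, d2, d3, d4] <;> omega
  · have hfr : x ≤ 0 ∨ x ≥ ((PySem.List.pyGetD image 0 []).length : Int) - 1 ∨
        y ≤ 0 ∨ y ≥ (image.length : Int) - 1 := by omega
    refine iff_of_true ?_ ?_
    · simp only [Bool.or_eq_true, decide_eq_true_iff]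
      tauto
    · simp only [Bool.or_eq_true, Bool.not_eq_eq_eq_not, Bool.not_true, Bool.and_eq_false_iff,
        pvInside, decide_eq_false_iff_not, not_and, not_le, not_lt]
      left
      omega

-- loop invariant: the two folds build the same set, given the per-point border equality
theorem pv_fold_eq (image : List (List Int)) (registro : List (Int × Int))
    (hok : ∀ p ∈ registro,
      (decide (p.1 ≤ 0) || decide (p.1 ≥ ((PySem.List.pyGetD image 0 []).length : Int) - 1) ||
       decide (p.2 ≤ 0) || decide (p.2 ≥ (image.length : Int) - 1) ||
       PySem.Set.contains (pvMismatch image (image.length : Int)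
         ((PySem.List.pyGetD image 0 []).length : Int)) (p.1, p.2))
      = (!(pvInside (p.1+1) p.2 image && pvInside (p.1-1) p.2 image &&
           pvInside p.1 (p.2+1) image && pvInside p.1 (p.2-1) image)
         || !((pvPixel image p.2 (p.1+1) == pvPixel image p.2 p.1) &&
              (pvPixel image p.2 (p.1-1) == pvPixel image p.2 p.1) &&
              (pvPixel image (p.2+1) p.1 == pvPixel image p.2 p.1) &&
              (pvPixel image (p.2-1) p.1 == pvPixel image p.2 p.1)))) :
    ∀ (acc : List (Int × Int)),
    PySem.Set.ofList (registro.foldl (fun acc i =>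
      let x := i.1
      let y := i.2
      let colore := pvPixel image y x
      if acc.contains (x, y) then acc
      else if !(pvInside (x+1) y image && pvInside (x-1) y image &&
                pvInside x (y+1) image && pvInside x (y-1) image) then
        acc ++ [(x, y)]
      else if !((pvPixel image y (x+1) == colore) && (pvPixel image y (x-1) == colore) &&
                (pvPixel image (y+1) x == colore) && (pvPixel image (y-1) x == colore)) then
        acc ++ [(x, y)]
      else acc) acc)
    = registro.foldl (fun bordo p =>
        if decide (p.1 ≤ 0) || decide (p.1 ≥ ((PySem.List.pyGetD image 0 []).length : Int) - 1) ||
           decide (p.2 ≤ 0) || decide (p.2 ≥ (image.length : Int) - 1) ||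
           PySem.Set.contains (pvMismatch image (image.length : Int)
             ((PySem.List.pyGetD image 0 []).length : Int)) (p.1, p.2) then
          PySem.Set.add bordo (p.1, p.2)
        else bordo) (PySem.Set.ofList acc) := by
  induction registro with
  | nil => intro acc; rfl
  | cons p registro ih =>
    intro acc
    simp only [List.foldl_cons]
    rw [ih (fun q hq => hok q (List.mem_cons_of_mem _ hq))]
    have hp := hok p (List.mem_cons_self ..)
    congr 1
    by_cases hmem : p ∈ acc
    · have hb : acc.contains (p.1, p.2) = true := by
        simpa [List.contains_iff_mem] using hmem
      have hset : PySem.Set.add (PySem.Set.ofList acc) (p.1, p.2) = PySem.Set.ofList acc :=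
        PySem.Set.add_of_mem (by simpa [PySem.Set.mem_ofList] using hmem)
      simp only [hb, if_true]
      split <;> simp [hset]
    · have hb : acc.contains (p.1, p.2) = false := by
        simpa [List.contains_iff_mem] using hmem
      have hnm : (p.1, p.2) ∉ PySem.Set.ofList acc := by
        simpa [PySem.Set.mem_ofList] using hmem
      simp only [hb, Bool.false_eq_true, if_false]
      rw [hp]
      by_cases hi : (!(pvInside (p.1+1) p.2 image && pvInside (p.1-1) p.2 image &&
          pvInside p.1 (p.2+1) image && pvInside p.1 (p.2-1) image)) = true
      · simp [hi, PySem.Set.ofList_append_singleton, PySem.Set.add_of_not_mem hnm]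
      · by_cases hc : (!(pvPixel image p.2 (p.1+1) == pvPixel image p.2 p.1 &&
            pvPixel image p.2 (p.1-1) == pvPixel image p.2 p.1 &&
            pvPixel image (p.2+1) p.1 == pvPixel image p.2 p.1 &&
            pvPixel image (p.2-1) p.1 == pvPixel image p.2 p.1)) = true
        · simp [hi, hc, PySem.Set.ofList_append_singleton, PySem.Set.add_of_not_mem hnm]
        · simp [hi, hc]

-- ===== VERDICT (by name: the statement is the Claim_ definition above) =====
theorem calcola_bordo_spec : Claim_equal_calcola_bordo := by
  intro image registro _ hpre
  unfold Spec_calcola_bordo calcola_bordo calcola_bordo_alt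
  by_cases h : registro = []
  · subst h; rfl
  · simp only [h, if_false]
    rcases hpre with h' | ⟨himg, hrows, hpts⟩
    · exact absurd h' h
    · refine Eq.trans ?_ (pv_fold_eq image registro ?_ []).symm |>.symm
      · rfl
      · intro p hp
        exact pv_border_eq image p.1 p.2 (fun hint => hrows ⟨p, hp, hint⟩)
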